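-- pv_equiv track=rewrite | github.com/thequadsquad/Lumos | src/Lumos/Tables/SAX_CINE_CCs_Metrics_Table.py | resort
-- ===== SOURCE A (Python) =====
-- def resort(row, cats):
--     n = len(cats)
--     n_metrics = len(row)//n
--     ret = []
--     for i in range(n_metrics):
--         for j in range(n):
--             ret.append(row[i+j*n_metrics])
--     return ret
-- ===== SOURCE B (Python) =====
-- def resort(row, cats):
--     n = len(cats)
--     n_metrics = len(row) // n
--     buckets = {}
--     for p, x in enumerate(row[:n * n_metrics]):
--         buckets.setdefault(p % n_metrics, []).append(x)
--     return [x for i in range(n_metrics) for x in buckets.get(i, [])]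
-- ===== Notes on version B (the rewrite author's own statement) =====
-- stated objective: alternative
-- what changed: Replaces A's gather-by-computed-index nested loops (reading row[i+j*n_metrics]) with a single scatter pass that distributes each element into a dict of buckets keyed by its position mod n_metrics, then concatenates the buckets in key order.
import Mathlib
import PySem

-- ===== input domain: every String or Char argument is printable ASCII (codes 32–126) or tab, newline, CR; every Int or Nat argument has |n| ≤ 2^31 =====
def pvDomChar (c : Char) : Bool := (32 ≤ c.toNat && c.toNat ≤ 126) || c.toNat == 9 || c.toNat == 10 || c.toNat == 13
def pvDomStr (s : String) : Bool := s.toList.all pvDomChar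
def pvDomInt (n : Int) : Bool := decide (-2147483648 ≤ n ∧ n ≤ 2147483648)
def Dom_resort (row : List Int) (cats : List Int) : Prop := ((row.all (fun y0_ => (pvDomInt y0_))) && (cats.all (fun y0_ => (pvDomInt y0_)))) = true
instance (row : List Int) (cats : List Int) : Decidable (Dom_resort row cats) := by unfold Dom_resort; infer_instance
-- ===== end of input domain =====

-- B replaces A's gather-by-computed-index nested loops with one scatter pass into a dict of
-- buckets keyed by position mod n_metrics, then concatenates the buckets; same cost, different strategy.

-- ===== PORT A =====
-- row[i+j*n_metrics]: the index is always in range when cats ≠ [] (Pre_), so pyGetD is exact there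
def resort (row : List Int) (cats : List Int) : List Int :=
  let n := cats.length
  let nm := row.length / n
  (List.range nm).foldl (fun ret i =>
    (List.range n).foldl (fun ret j =>
      ret ++ [PySem.List.pyGetD row (((i + j * nm : Nat) : Int)) 0]) ret) []

-- ===== PORT B =====
-- scatter pass: buckets.setdefault(p % nm, []).append(x) over enumerate(row[:n*nm]),
-- then [x for i in range(nm) for x in buckets.get(i, [])]
def resort_alt (row : List Int) (cats : List Int) : List Int :=
  let n := cats.length
  let nm := row.length / n
  let buckets :=
    (PySem.List.enumerate (PySem.List.slice row none (some ((n * nm : Nat) : Int))) 0).foldl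
      (fun (d : PySem.Dict Int (List Int)) p =>
        d.modify (PySem.Int.mod p.1 ((nm : Nat) : Int)) [] (· ++ [p.2]))
      PySem.Dict.empty
  (PySem.List.pyRange 0 ((nm : Nat) : Int) 1).flatMap (fun i => buckets.getD i [])

-- ===== PRECONDITION & SPEC =====
-- Pre_ excludes cats = [], on which Python A raises ZeroDivisionError (len(row)//0)
def Pre_resort (row : List Int) (cats : List Int) : Prop := cats ≠ []
instance (row : List Int) (cats : List Int) : Decidable (Pre_resort row cats) := by unfold Pre_resort; infer_instance
def pvWitness_resort : List Int × List Int := ([1, 2, 3, 4, 5, 6], [10, 20])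
def Spec_resort (row : List Int) (cats : List Int) (out : List Int) : Prop := out = resort_alt row cats
instance (row : List Int) (cats : List Int) (out : List Int) : Decidable (Spec_resort row cats out) := by unfold Spec_resort; infer_instance

-- ===== CLAIM (what is proved, stated in full; the proofs are below) =====
def Claim_equal_resort : Prop := ∀ (row : List Int) (cats : List Int), Dom_resort row cats → Pre_resort row cats → Spec_resort row cats (resort row cats)

-- ===== LEMMAS AND PROOFS =====

theorem foldl_app_map {α β : Type} (g : α → β) (l : List α) (acc : List β) :
    l.foldl (fun ret i => ret ++ [g i]) acc = acc ++ l.map g := by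
  induction l generalizing acc with
  | nil => simp
  | cons a l ih => simp [ih]

theorem foldl_app_flat {α β : Type} (g : α → List β) (l : List α) (acc : List β) :
    l.foldl (fun ret i => ret ++ g i) acc = acc ++ l.flatMap g := by
  induction l generalizing acc with
  | nil => simp
  | cons a l ih => simp [ih]

theorem foldl_congr_fun {α β : Type} (l : List α) (f g : β → α → β) (a : β)
    (h : ∀ b x, f b x = g b x) : l.foldl f a = l.foldl g a := by
  induction l generalizing a with
  | nil => rfl
  | cons x l ih => simp only [List.foldl_cons, h]; exact ih _

-- A's nested append-loops as a flatMap of getD reads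
theorem resort_eq (row : List Int) (cats : List Int) :
    resort row cats =
      (List.range (row.length / cats.length)).flatMap
        (fun i => (List.range cats.length).map
          (fun j => row.getD (i + j * (row.length / cats.length)) 0)) := by
  unfold resort
  rw [foldl_congr_fun _ _
    (fun ret i => ret ++ (List.range cats.length).map
      (fun j => row.getD (i + j * (row.length / cats.length)) 0)) []
    (by
      intro b i
      rw [foldl_app_map]
      congr 1
      apply List.map_congr_left
      intro j _
      exact PySem.List.pyGetD_natCast row _ 0)]
  rw [foldl_app_flat]
  rfl

theorem filter_range_eq_single (m i : Nat) (h : i < m) :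
    (List.range m).filter (fun k => k == i) = [i] := by
  induction m with
  | zero => omega
  | succ m ih =>
    rw [List.range_succ, List.filter_append]
    by_cases hi : i < m
    · rw [ih hi]
      have : m ≠ i := by omega
      simp [this]
    · have him : i = m := by omega
      subst him
      have : (List.range i).filter (fun k => k == i) = [] := by
        apply List.filter_eq_nil_iff.mpr
        intro k hk
        have := List.mem_range.mp hk
        simp; omega
      simp [this]

theorem filter_range_mod (nm i : Nat) (hi : i < nm) :
    ∀ c, (List.range (c * nm)).filter (fun k => k % nm == i)
        = (List.range c).map (fun j => i + j * nm) := by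
  intro c
  induction c with
  | zero => simp
  | succ c ih =>
    have hmul : (c + 1) * nm = c * nm + nm := by ring
    rw [hmul, List.range_add, List.filter_append, ih, List.filter_map]
    have hseg : (List.range nm).filter ((fun k => k % nm == i) ∘ (fun k => c * nm + k)) = [i] := by
      rw [List.filter_congr (q := fun k => k == i) ?_]
      · exact filter_range_eq_single nm i hi
      · intro k hk
        have hk' := List.mem_range.mp hk
        simp only [Function.comp]
        have : (c * nm + k) % nm = k := by
          rw [Nat.add_comm, Nat.add_mul_mod_self_right, Nat.mod_eq_of_lt hk']
        rw [this]
    rw [hseg, List.range_succ, List.map_append]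
    simp [Nat.add_comm]

-- the scatter pass over enumerate, characterised by a filter of positions
theorem enum_filter (nm i : Nat) : ∀ (ys : List Int) (s : Nat),
    (((PySem.List.enumerate ys ((s : Nat) : Int)).map
        (fun p => (PySem.Int.mod p.1 ((nm : Nat) : Int), p.2))).filter
        (fun q => q.1 == ((i : Nat) : Int))).map (·.2)
    = ((List.range ys.length).filter (fun k => (s + k) % nm == i)).map (fun k => ys.getD k 0) := by
  intro ys
  induction ys with
  | nil => intro s; simp [PySem.List.enumerate_nil]
  | cons y ys ih =>
    intro s
    rw [PySem.List.enumerate_cons]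
    have hcast : ((s : Nat) : Int) + 1 = (((s + 1 : Nat)) : Int) := by push_cast; ring
    rw [hcast, List.map_cons, List.length_cons, List.range_succ_eq_map]
    simp only [PySem.Int.mod_natCast]
    rw [List.filter_cons, List.filter_cons]
    have htail : (List.filter (fun k => (s + k) % nm == i) (List.map Nat.succ (List.range ys.length)))
        = List.map Nat.succ (List.filter (fun k => (s + 1 + k) % nm == i) (List.range ys.length)) := by
      rw [List.filter_map]
      congr 1
      apply List.filter_congr
      intro k _
      simp only [Function.comp, Nat.succ_eq_add_one]
      have h3 : s + (k + 1) = s + 1 + k := by omega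
      rw [h3]
    have hT : (List.filter (fun q => q.1 == ((i : Nat) : Int))
          ((PySem.List.enumerate ys (((s + 1 : Nat)) : Int)).map
            (fun p => (PySem.Int.mod p.1 ((nm : Nat) : Int), p.2)))).map (·.2)
        = List.map (fun k => (y :: ys).getD k 0)
            (List.map Nat.succ (List.filter (fun k => (s + 1 + k) % nm == i) (List.range ys.length))) := by
      rw [ih (s + 1), List.map_map]
      apply List.map_congr_left
      intro k _
      simp [Nat.succ_eq_add_one]
    by_cases hc : s % nm = i
    · rw [if_pos (by simp [hc]), if_pos (by simp [hc])]
      rw [List.map_cons, List.map_cons, htail]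
      exact congrArg₂ List.cons (by simp) hT
    · rw [if_neg (by intro h; apply hc; simp at h; exact_mod_cast h), if_neg (by simp [hc])]
      rw [htail]
      exact hT

theorem getD_take_of_lt (l : List Int) (m k : Nat) (h : k < m) :
    (l.take m).getD k 0 = l.getD k 0 := by
  unfold List.getD
  rw [List.getElem?_take_of_lt h]

-- B as the same flatMap of getD reads
theorem resort_alt_eq (row : List Int) (cats : List Int) :
    resort_alt row cats =
      (List.range (row.length / cats.length)).flatMap
        (fun i => (List.range cats.length).map
          (fun j => row.getD (i + j * (row.length / cats.length)) 0)) := by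
  unfold resort_alt
  simp only []
  set n := cats.length with hn
  set nm := row.length / n with hnm
  have hle : n * nm ≤ row.length := by
    calc n * nm = nm * n := Nat.mul_comm _ _
      _ ≤ row.length := Nat.div_mul_le_self _ _
  have hxs : PySem.List.slice row none (some ((n * nm : Nat) : Int)) = row.take (n * nm) :=
    PySem.List.slice_to_natCast row (n * nm)
  have hlen : (row.take (n * nm)).length = n * nm := by
    rw [List.length_take]; omega
  rw [hxs, PySem.List.pyRange_zero_natCast]
  simp only [List.flatMap_def, List.map_map]
  congr 1
  apply List.map_congr_left
  intro i hi
  have hi' := List.mem_range.mp hi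
  simp only [Function.comp]
  have hfold : (PySem.List.enumerate (row.take (n * nm)) 0).foldl
      (fun (d : PySem.Dict Int (List Int)) p =>
        d.modify (PySem.Int.mod p.1 ((nm : Nat) : Int)) [] (· ++ [p.2]))
      PySem.Dict.empty
    = (((PySem.List.enumerate (row.take (n * nm)) 0).map
        (fun p => (PySem.Int.mod p.1 ((nm : Nat) : Int), p.2))).foldl
        (fun d q => d.modify q.1 [] (· ++ [q.2])) PySem.Dict.empty) := by rw [List.foldl_map]
  rw [hfold, PySem.Dict.getD_foldl_modify_append, PySem.Dict.getD_empty, List.nil_append]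
  have h0 : (0 : Int) = ((0 : Nat) : Int) := rfl
  rw [h0, enum_filter nm i (row.take (n * nm)) 0]
  simp only [Nat.zero_add, hlen]
  rw [filter_range_mod nm i hi' n, List.map_map]
  apply List.map_congr_left
  intro j hj
  have hj' := List.mem_range.mp hj
  simp only [Function.comp]
  have hb : i + j * nm < n * nm := by
    calc i + j * nm < nm + j * nm := by omega
      _ = (j + 1) * nm := by ring
      _ ≤ n * nm := Nat.mul_le_mul_right nm hj'
  exact getD_take_of_lt row (n * nm) (i + j * nm) hb

-- ===== VERDICT (by name: the statement is the Claim_ definition above) =====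
theorem resort_spec : Claim_equal_resort := by
  intro row cats _ hpre
  unfold Spec_resort
  rw [resort_eq row cats, resort_alt_eq row cats]
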